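-- pv_equiv track=rewrite | github.com/QVQZZZ/HeFlwr | src/heflwr/nn/ssembedding.py | convert_indices
-- ===== SOURCE A (Python) =====
-- from typing import Tuple, List, Union, Optional
--
-- def convert_indices(indices: List[Tuple[int, int]]) -> List[Tuple[int, int]]:
--     ret_indices = []
--     offset = 0
--     for start, end in indices:
--         ret_start = offset
--         ret_end = offset + (end - start)
--         ret_indices.append((ret_start, ret_end))
--         offset = ret_end
--     return ret_indices
-- ===== SOURCE B (Python) =====
-- def convert_indices(indices):
--     lengths = [e - s for s, e in indices]
--     ends = []
--     t = 0
--     for L in lengths: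
--         t += L
--         ends.append(t)
--     starts = [0] + ends[:-1]
--     return list(zip(starts, ends))
-- ===== Notes on version B (the rewrite author's own statement) =====
-- stated objective: alternative
-- what changed: Replaces A's single running-offset pass that builds result pairs directly with a prefix-sum decomposition: compute lengths, accumulate them into cumulative end offsets, derive starts as the shifted ends, and zip starts with ends.
import Mathlib
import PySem

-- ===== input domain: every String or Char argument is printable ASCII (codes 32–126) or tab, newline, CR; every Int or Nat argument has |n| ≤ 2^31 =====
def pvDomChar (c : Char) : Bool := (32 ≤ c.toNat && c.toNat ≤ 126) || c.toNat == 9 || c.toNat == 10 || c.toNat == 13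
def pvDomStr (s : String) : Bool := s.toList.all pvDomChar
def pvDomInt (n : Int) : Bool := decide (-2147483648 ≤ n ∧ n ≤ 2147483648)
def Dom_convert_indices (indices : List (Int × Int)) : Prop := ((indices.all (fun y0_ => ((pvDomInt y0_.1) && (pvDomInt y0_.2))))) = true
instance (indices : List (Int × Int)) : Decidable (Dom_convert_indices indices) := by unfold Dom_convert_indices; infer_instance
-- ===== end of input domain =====

-- B replaces A's single running-offset pass with a prefix-sum decomposition (lengths → cumulative ends → starts → zip); objective: alternative, same cost.

-- ===== PORT A =====
-- A: one pass with an offset accumulator, appending (offset, offset + (end-start)).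
def convert_indices (indices : List (Int × Int)) : List (Int × Int) :=
  (indices.foldl
    (fun (st : List (Int × Int) × Int) p =>
      let ret_start := st.2
      let ret_end := st.2 + (p.2 - p.1)
      (st.1 ++ [(ret_start, ret_end)], ret_end))
    ([], 0)).1

-- ===== PORT B =====
-- running accumulation of ends (the `for L in lengths` loop of Source B)
def accEnds (t : Int) : List Int → List Int
  | [] => []
  | l :: ls => (t + l) :: accEnds (t + l) ls

def convert_indices_alt (indices : List (Int × Int)) : List (Int × Int) :=
  let lengths := indices.map (fun p => p.2 - p.1)
  let ends := accEnds 0 lengths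
  let starts := (0 : Int) :: ends.dropLast
  starts.zip ends

-- ===== PRECONDITION & SPEC =====
def Spec_convert_indices (indices : List (Int × Int)) (out : List (Int × Int)) : Prop := out = convert_indices_alt indices
instance (indices : List (Int × Int)) (out : List (Int × Int)) : Decidable (Spec_convert_indices indices out) := by unfold Spec_convert_indices; infer_instance

-- ===== CLAIM (what is proved, stated in full; the proofs are below) =====
def Claim_equal_convert_indices : Prop := ∀ (indices : List (Int × Int)), Dom_convert_indices indices → Spec_convert_indices indices (convert_indices indices)

-- ===== LEMMAS AND PROOFS =====

-- common reference: the result of remapping starting at offset `off`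
def pvRef (off : Int) : List (Int × Int) → List (Int × Int)
  | [] => []
  | (s, e) :: rest => (off, off + (e - s)) :: pvRef (off + (e - s)) rest

theorem foldA_eq_ref (indices : List (Int × Int)) :
    ∀ (acc : List (Int × Int)) (off : Int),
      (indices.foldl
        (fun (st : List (Int × Int) × Int) p =>
          (st.1 ++ [(st.2, st.2 + (p.2 - p.1))], st.2 + (p.2 - p.1)))
        (acc, off)).1 = acc ++ pvRef off indices := by
  induction indices with
  | nil => intro acc off; simp [pvRef]
  | cons p rest ih =>
    intro acc off
    obtain ⟨s, e⟩ := p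
    simp only [List.foldl, pvRef]
    rw [ih]
    simp

theorem zip_dropLast_cons (a : Int) (R : List Int) :
    (List.dropLast (a :: R)).zip R = (a :: R.dropLast).zip R := by
  cases R with
  | nil => rfl
  | cons x xs => simp [List.dropLast]

theorem zipB_eq_ref (indices : List (Int × Int)) :
    ∀ (off : Int),
      ((off :: (accEnds off (indices.map (fun p => p.2 - p.1))).dropLast).zip
        (accEnds off (indices.map (fun p => p.2 - p.1)))) = pvRef off indices := by
  induction indices with
  | nil => intro off; rfl
  | cons p rest ih =>
    intro off
    obtain ⟨s, e⟩ := p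
    simp only [List.map, accEnds, pvRef]
    rw [List.zip_cons_cons, zip_dropLast_cons, ih]

-- ===== VERDICT (by name: the statement is the Claim_ definition above) =====
theorem convert_indices_spec : Claim_equal_convert_indices := by
  intro indices _
  unfold Spec_convert_indices convert_indices convert_indices_alt
  rw [foldA_eq_ref, zipB_eq_ref]
  simp
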